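-- pv_equiv track=rewrite | github.com/gmmrr/src-separation | pipeline/denoising/sgmse.py | _chunk_bounds
-- ===== SOURCE A (Python) =====
-- from typing import Dict, List, Optional, Sequence
--
-- def _chunk_bounds(total_len: int, chunk_len: int, overlap_len: int) -> List[tuple[int, int]]:
--     if total_len <= 0:
--         return [(0, 0)]
--     if chunk_len <= 0 or chunk_len >= total_len:
--         return [(0, total_len)]
--
--     overlap_len = max(0, min(overlap_len, chunk_len - 1))
--     step = max(1, chunk_len - overlap_len)
--     bounds: List[tuple[int, int]] = []
--     start = 0
--     while start < total_len:
--         end = min(start + chunk_len, total_len)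
--         bounds.append((start, end))
--         if end >= total_len:
--             break
--         start += step
--     return bounds
-- ===== SOURCE B (Python) =====
-- def _chunk_bounds(total_len, chunk_len, overlap_len):
--     if total_len <= 0:
--         return [(0, 0)]
--     if chunk_len <= 0 or chunk_len >= total_len:
--         return [(0, total_len)]
--     overlap_len = max(0, min(overlap_len, chunk_len - 1))
--     step = max(1, chunk_len - overlap_len)
--     n = -((chunk_len - total_len) // step)  # ceil((total_len - chunk_len) / step)
--     return [(i * step, min(i * step + chunk_len, total_len)) for i in range(n + 1)]
-- ===== Notes on version B (the rewrite author's own statement) =====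
-- stated objective: simpler
-- what changed: Replaces the while-loop that tests end >= total_len and breaks dynamically with a closed-form ceiling-division chunk count n followed by a single comprehension emitting (i*step, min(i*step+chunk_len, total_len)) for i in range(n+1).
import Mathlib
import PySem

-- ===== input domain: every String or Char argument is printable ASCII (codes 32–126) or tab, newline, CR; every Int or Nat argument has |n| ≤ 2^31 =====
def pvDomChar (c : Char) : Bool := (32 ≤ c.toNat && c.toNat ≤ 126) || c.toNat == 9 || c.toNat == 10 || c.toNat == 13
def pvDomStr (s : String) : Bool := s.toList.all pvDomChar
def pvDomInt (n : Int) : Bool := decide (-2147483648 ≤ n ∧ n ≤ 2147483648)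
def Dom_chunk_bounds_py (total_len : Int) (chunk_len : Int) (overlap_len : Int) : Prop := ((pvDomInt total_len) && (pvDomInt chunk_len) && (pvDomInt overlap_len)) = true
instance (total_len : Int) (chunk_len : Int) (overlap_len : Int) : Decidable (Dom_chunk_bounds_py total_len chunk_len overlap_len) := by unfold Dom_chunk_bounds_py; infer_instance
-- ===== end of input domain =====

-- B replaces A's while-loop (which tests end >= total_len each step) by a closed-form
-- ceiling-division chunk count followed by one comprehension over range(n+1); objective: simpler decomposition.

-- ===== PORT A =====
def chunkLoopA (total_len chunk_len step : Int) (hs : 1 ≤ step) (start : Int) (bounds : List (Int × Int)) : List (Int × Int) :=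
  if _h : start < total_len then
    let e := min (start + chunk_len) total_len
    if total_len ≤ e then bounds ++ [(start, e)]
    else chunkLoopA total_len chunk_len step hs (start + step) (bounds ++ [(start, e)])
  else bounds
termination_by (total_len - start).toNat
decreasing_by omega

def chunk_bounds_py (total_len : Int) (chunk_len : Int) (overlap_len : Int) : List (Int × Int) :=
  if total_len ≤ 0 then [(0, 0)]
  else if chunk_len ≤ 0 ∨ total_len ≤ chunk_len then [(0, total_len)]
  else
    let ov := max 0 (min overlap_len (chunk_len - 1))
    let step := max 1 (chunk_len - ov)
    chunkLoopA total_len chunk_len step (le_max_left 1 _) 0 []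

-- ===== PORT B =====
def chunk_bounds_py_alt (total_len : Int) (chunk_len : Int) (overlap_len : Int) : List (Int × Int) :=
  if total_len ≤ 0 then [(0, 0)]
  else if chunk_len ≤ 0 ∨ total_len ≤ chunk_len then [(0, total_len)]
  else
    let ov := max 0 (min overlap_len (chunk_len - 1))
    let step := max 1 (chunk_len - ov)
    let n := -(PySem.Int.floordiv (chunk_len - total_len) step)
    (PySem.List.pyRange 0 (n + 1) 1).map
      (fun i => (i * step, min (i * step + chunk_len) total_len))

-- ===== PRECONDITION & SPEC =====
def Spec_chunk_bounds_py (total_len : Int) (chunk_len : Int) (overlap_len : Int) (out : List (Int × Int)) : Prop := out = chunk_bounds_py_alt total_len chunk_len overlap_len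
instance (total_len : Int) (chunk_len : Int) (overlap_len : Int) (out : List (Int × Int)) : Decidable (Spec_chunk_bounds_py total_len chunk_len overlap_len out) := by unfold Spec_chunk_bounds_py; infer_instance

-- ===== CLAIM (what is proved, stated in full; the proofs are below) =====
def Claim_equal_chunk_bounds_py : Prop := ∀ (total_len : Int) (chunk_len : Int) (overlap_len : Int), Dom_chunk_bounds_py total_len chunk_len overlap_len → Spec_chunk_bounds_py total_len chunk_len overlap_len (chunk_bounds_py total_len chunk_len overlap_len)

-- ===== LEMMAS AND PROOFS =====

-- The loop from start = i*step produces exactly the comprehension's tail from index i.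
lemma loopA_eq_range (total chunk step n : Int) (hs : 1 ≤ step)
    (hc : 0 < chunk) (_hct : chunk < total) (hsc : step ≤ chunk)
    (hn1 : (n - 1) * step < total - chunk) (hn2 : total - chunk ≤ n * step) :
    ∀ (k : Nat) (i : Int) (acc : List (Int × Int)), (n - i).toNat = k → 0 ≤ i → i ≤ n →
      chunkLoopA total chunk step hs (i * step) acc
        = acc ++ (PySem.List.pyRange i (n + 1) 1).map
            (fun j => (j * step, min (j * step + chunk) total)) := by
  intro k
  induction k with
  | zero =>
    intro i acc hk h0 hi
    have hin : i = n := by omega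
    subst hin
    have hbreak : total ≤ i * step + chunk := by omega
    have hlt : i * step < total := by
      have h1 : (i - 1) * step = i * step - step := by ring
      omega
    rw [chunkLoopA]
    rw [dif_pos hlt]
    have hmin : min (i * step + chunk) total = total := by omega
    simp only [hmin]
    rw [if_pos (le_refl total)]
    rw [PySem.List.pyRange_one_cons (by omega), PySem.List.pyRange_one_eq_nil (by omega)]
    simp [hmin]
  | succ k ih =>
    intro i acc hk h0 hi
    by_cases hin : i = n
    · subst hin
      have hbreak : total ≤ i * step + chunk := by omega
      have hlt : i * step < total := by
        have h1 : (i - 1) * step = i * step - step := by ring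
        omega
      rw [chunkLoopA]
      rw [dif_pos hlt]
      have hmin : min (i * step + chunk) total = total := by omega
      simp only [hmin]
      rw [if_pos (le_refl total)]
      rw [PySem.List.pyRange_one_cons (by omega), PySem.List.pyRange_one_eq_nil (by omega)]
      simp [hmin]
    · have hiltn : i < n := by omega
      have hmono : i * step ≤ (n - 1) * step :=
        mul_le_mul_of_nonneg_right (by omega) (by omega)
      have hend : i * step + chunk < total := by omega
      have hlt : i * step < total := by omega
      rw [chunkLoopA]
      rw [dif_pos hlt]
      have hmin : min (i * step + chunk) total = i * step + chunk := by omega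
      simp only [hmin]
      rw [if_neg (by omega)]
      have hstep : i * step + step = (i + 1) * step := by ring
      rw [hstep]
      rw [ih (i + 1) (acc ++ [(i * step, i * step + chunk)]) (by omega) (by omega) (by omega)]
      conv_rhs => rw [PySem.List.pyRange_one_cons (show i < n + 1 by omega)]
      simp
      omega

-- ===== VERDICT (by name: the statement is the Claim_ definition above) =====
theorem chunk_bounds_py_spec : Claim_equal_chunk_bounds_py := by
  intro total chunk ov _hdom
  unfold Spec_chunk_bounds_py chunk_bounds_py chunk_bounds_py_alt
  by_cases h1 : total ≤ 0
  · simp [h1]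
  · rw [if_neg h1, if_neg h1]
    by_cases h2 : chunk ≤ 0 ∨ total ≤ chunk
    · rw [if_pos h2, if_pos h2]
    · rw [if_neg h2, if_neg h2]
      dsimp only
      have hc : 0 < chunk := by omega
      have hct : chunk < total := by omega
      set ov2 := max 0 (min ov (chunk - 1)) with hov2
      set step := max 1 (chunk - ov2) with hstep
      set n := -(PySem.Int.floordiv (chunk - total) step) with hn
      have hs : 1 ≤ step := le_max_left 1 _
      have hsc : step ≤ chunk := by omega
      have hceil : (n - 1) * step < total - chunk ∧ total - chunk ≤ n * step := by
        have h := (PySem.Int.neg_floordiv_neg_eq_iff_of_pos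
          (a := total - chunk) (b := step) (q := n) (by omega)).mp ?_
        · exact h
        · rw [hn]
          congr 1
          congr 1
          ring
      have := loopA_eq_range total chunk step n hs hc hct hsc hceil.1 hceil.2
        (n - 0).toNat 0 [] rfl (le_refl 0) ?_
      · simpa using this
      · have h1' : (n - 1) * step = n * step - step := by ring
        nlinarith [hceil.1, hceil.2]
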